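-- pv_equiv track=rewrite | github.com/txelu21/crypto-narrative-hunter-tfm | data-pipeline/services/tokens/token_export.py | _find_ranking_gaps
-- ===== SOURCE A (Python) =====
-- from typing import List, Dict, Any, Optional
--
-- def _find_ranking_gaps(ranks: List[int]) -> List[Dict[str, int]]:
--     """Find gaps in ranking sequence"""
--     sorted_ranks = sorted(ranks)
--     gaps = []
--
--     for i in range(len(sorted_ranks) - 1):
--         gap_size = sorted_ranks[i + 1] - sorted_ranks[i] - 1
--         if gap_size > 0:
--             gaps.append({
--                 "start_rank": sorted_ranks[i] + 1,
--                 "end_rank": sorted_ranks[i + 1] - 1,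
--                 "gap_size": gap_size
--             })
--
--     return gaps[:10]  # Return top 10 gaps
-- ===== SOURCE B (Python) =====
-- def _find_ranking_gaps(ranks):
--     """Find gaps in ranking sequence without sorting the ranks: collect the
--     gap-start candidates r+1 from the membership set, keep the 10 smallest,
--     and close each gap with the least present rank above it."""
--     present = set(ranks)
--     if not present:
--         return []
--     hi = max(present)
--     starts = sorted(s for s in (r + 1 for r in present)
--                     if s not in present and s <= hi)[:10]
--     gaps = []
--     for s in starts:
--         end = min(x for x in present if x > s) - 1
--         gaps.append({"start_rank": s, "end_rank": end, "gap_size": end - s + 1})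
--     return gaps
-- ===== Notes on version B (the rewrite author's own statement) =====
-- stated objective: alternative
-- what changed: B never sorts the ranks: it builds a membership set, collects the gap-start candidates r+1 that are absent from the set and below the maximum, keeps the 10 smallest, and closes each gap with the minimum present rank above its start, instead of A's sort-then-adjacent-pair scan.
import Mathlib
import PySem

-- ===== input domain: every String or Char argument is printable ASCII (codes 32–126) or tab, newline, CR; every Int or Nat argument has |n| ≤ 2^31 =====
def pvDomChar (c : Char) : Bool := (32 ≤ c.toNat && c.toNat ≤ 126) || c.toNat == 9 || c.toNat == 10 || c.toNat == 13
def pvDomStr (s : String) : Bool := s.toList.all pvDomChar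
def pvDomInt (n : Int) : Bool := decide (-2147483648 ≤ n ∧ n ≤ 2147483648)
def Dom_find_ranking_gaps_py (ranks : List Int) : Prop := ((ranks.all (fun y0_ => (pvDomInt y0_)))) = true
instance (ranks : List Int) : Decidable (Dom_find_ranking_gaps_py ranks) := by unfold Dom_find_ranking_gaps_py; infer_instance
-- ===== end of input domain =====

-- B avoids sorting the ranks: it builds a membership set, collects the gap-start
-- candidates r+1 absent from the set and below the maximum, keeps the 10 smallest,
-- and closes each gap with the minimum present rank above its start
-- (objective: alternative algorithm, same asymptotic cost).

-- ===== PORT A =====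
def find_ranking_gaps_py (ranks : List Int) : List (List (String × Int)) :=
  let sorted_ranks := PySem.List.sorted ranks (fun x => x) false
  let gaps := (PySem.List.pyRange 0 (PySem.List.len sorted_ranks - 1) 1).foldl
    (fun acc i =>
      if PySem.List.pyGetD sorted_ranks (i + 1) 0 - PySem.List.pyGetD sorted_ranks i 0 - 1 > 0 then
        acc ++ [[("start_rank", PySem.List.pyGetD sorted_ranks i 0 + 1),
                 ("end_rank", PySem.List.pyGetD sorted_ranks (i + 1) 0 - 1),
                 ("gap_size", PySem.List.pyGetD sorted_ranks (i + 1) 0 - PySem.List.pyGetD sorted_ranks i 0 - 1)]]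
      else acc) []
  PySem.List.slice gaps none (some 10)

-- ===== PORT B =====
def find_ranking_gaps_py_alt (ranks : List Int) : List (List (String × Int)) :=
  let present := PySem.Set.ofList ranks
  if present.isEmpty then []
  else
    let hi := (PySem.List.max? present (fun x => x)).getD 0
    let starts := PySem.List.slice
      (PySem.List.sorted
        ((present.map (fun r => r + 1)).filter
          (fun s => !present.contains s && decide (s ≤ hi)))
        (fun x => x) false)
      none (some 10)
    starts.map (fun s =>
      let e := (PySem.List.min? (present.filter (fun x => decide (s < x))) (fun x => x)).getD 0 - 1
      [("start_rank", s), ("end_rank", e), ("gap_size", e - s + 1)])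

-- ===== PRECONDITION & SPEC =====
def Spec_find_ranking_gaps_py (ranks : List Int) (out : List (List (String × Int))) : Prop := out = find_ranking_gaps_py_alt ranks
instance (ranks : List Int) (out : List (List (String × Int))) : Decidable (Spec_find_ranking_gaps_py ranks out) := by unfold Spec_find_ranking_gaps_py; infer_instance

-- ===== CLAIM (what is proved, stated in full; the proofs are below) =====
def Claim_equal_find_ranking_gaps_py : Prop := ∀ (ranks : List Int), Dom_find_ranking_gaps_py ranks → Spec_find_ranking_gaps_py ranks (find_ranking_gaps_py ranks)

-- ===== LEMMAS AND PROOFS =====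

-- the gap record between adjacent sorted ranks a < b
def pvGapRec (a b : Int) : List (String × Int) :=
  [("start_rank", a + 1), ("end_rank", b - 1), ("gap_size", b - a - 1)]

-- all gaps of a (sorted) list, by adjacent pairs
def pvGaps : List Int → List (List (String × Int))
  | a :: b :: t => (if b - a > 1 then [pvGapRec a b] else []) ++ pvGaps (b :: t)
  | _ => []

-- remove consecutive duplicates
def pvDD : List Int → List Int
  | a :: b :: t => if a = b then pvDD (b :: t) else a :: pvDD (b :: t)
  | l => l

lemma pvDD_cons (b : Int) (t : List Int) : ∃ t', pvDD (b :: t) = b :: t' := by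
  induction t generalizing b with
  | nil => exact ⟨[], rfl⟩
  | cons c t ih =>
    by_cases h : b = c
    · obtain ⟨t', ht⟩ := ih c
      exact ⟨t', by rw [show pvDD (b :: c :: t) = pvDD (c :: t) from by simp [pvDD, h], ht, h]⟩
    · exact ⟨pvDD (c :: t), by simp [pvDD, h]⟩

lemma pvGaps_pvDD (s : List Int) : pvGaps s = pvGaps (pvDD s) := by
  induction s with
  | nil => rfl
  | cons a t ih =>
    cases t with
    | nil => rfl
    | cons b t' =>
      by_cases h : a = b
      · subst h
        rw [show pvDD (a :: a :: t') = pvDD (a :: t') from by simp [pvDD], ← ih]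
        simp [pvGaps]
      · obtain ⟨t'', ht⟩ := pvDD_cons b t'
        rw [show pvDD (a :: b :: t') = a :: pvDD (b :: t') from by simp [pvDD, h], ht]
        simp only [pvGaps, ih, ht]

lemma pvDD_mem (s : List Int) (x : Int) : x ∈ pvDD s ↔ x ∈ s := by
  induction s with
  | nil => rfl
  | cons a t ih =>
    cases t with
    | nil => rfl
    | cons b t' =>
      by_cases h : a = b
      · subst h
        rw [show pvDD (a :: a :: t') = pvDD (a :: t') from by simp [pvDD], ih]
        simp
      · rw [show pvDD (a :: b :: t') = a :: pvDD (b :: t') from by simp [pvDD, h]]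
        simp [ih]

lemma pvDD_pairwise_lt (s : List Int) (hs : s.Pairwise (· ≤ ·)) : (pvDD s).Pairwise (· < ·) := by
  induction s with
  | nil => exact List.Pairwise.nil
  | cons a t ih =>
    cases t with
    | nil => simp [pvDD]
    | cons b t' =>
      have htail : (b :: t').Pairwise (· ≤ ·) := (List.pairwise_cons.1 hs).2
      by_cases h : a = b
      · subst h
        rw [show pvDD (a :: a :: t') = pvDD (a :: t') from by simp [pvDD]]
        exact ih htail
      · rw [show pvDD (a :: b :: t') = a :: pvDD (b :: t') from by simp [pvDD, h]]
        refine List.Pairwise.cons ?_ (ih htail)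
        intro y hy
        have hy' : y ∈ b :: t' := (pvDD_mem _ _).1 hy
        have hab : a ≤ b := (List.pairwise_cons.1 hs).1 b (by simp)
        rcases List.mem_cons.1 hy' with hEq | hMem
        · omega
        · have hby : b ≤ y := (List.pairwise_cons.1 htail).1 y hMem
          omega

lemma sorted_set_eq_pvDD (ranks : List Int) :
    PySem.List.sorted (PySem.Set.ofList ranks) (fun x => x) false
      = pvDD (PySem.List.sorted ranks (fun x => x) false) := by
  have hpw : (PySem.List.sorted ranks (fun x => x) false).Pairwise (· ≤ ·) :=
    PySem.List.sorted_pairwise ranks (fun x => x)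
  have hlt : (pvDD (PySem.List.sorted ranks (fun x => x) false)).Pairwise (· < ·) :=
    pvDD_pairwise_lt _ hpw
  have hnd : (pvDD (PySem.List.sorted ranks (fun x => x) false)).Nodup :=
    hlt.imp (fun h => ne_of_lt h)
  have hperm : (pvDD (PySem.List.sorted ranks (fun x => x) false)).Perm (PySem.Set.ofList ranks) := by
    rw [List.perm_ext_iff_of_nodup hnd (PySem.Set.nodup_ofList ranks)]
    intro x
    rw [pvDD_mem, PySem.List.mem_sorted, PySem.Set.mem_ofList]
  exact PySem.List.sorted_eq_of_perm_of_pairwise_lt _ _ _ hperm hlt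

-- the adjacent-pair view of A's index loop
lemma pairs_eq (s : List Int) :
    (PySem.List.pyRange 0 (PySem.List.len s - 1) 1).map
        (fun i => (PySem.List.pyGetD s i 0, PySem.List.pyGetD s (i + 1) 0))
      = s.zip s.tail := by
  apply List.ext_getElem
  · simp [PySem.List.length_pyRange_one, PySem.List.len]
  · intro k h1 h2
    have hk : k < s.length - 1 := by
      simpa [PySem.List.length_pyRange_one, PySem.List.len] using h1
    simp only [List.getElem_map, List.getElem_zip]
    rw [PySem.List.getElem_pyRange_one]
    have e1 : (0 : Int) + (k : Int) = ((k : Nat) : Int) := by omega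
    rw [e1]
    have e2 : ((k : Nat) : Int) + 1 = (((k + 1) : Nat) : Int) := by push_cast; omega
    rw [e2, PySem.List.pyGetD_natCast, PySem.List.pyGetD_natCast]
    have hk1 : k < s.length := by omega
    have hk2 : k + 1 < s.length := by omega
    simp [List.getD_eq_getElem?_getD, hk1, hk2, List.getElem_tail]

lemma filter_zip_eq_pvGaps (s : List Int) :
    (((s.zip s.tail).filter (fun p => decide (p.2 - p.1 > 1))).map (fun p => pvGapRec p.1 p.2))
      = pvGaps s := by
  induction s with
  | nil => rfl
  | cons a t ih =>
    cases t with
    | nil => rfl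
    | cons b t' =>
      by_cases h : b - a > 1 <;>
        simp [pvGaps, h] <;> simpa using ih

lemma foldA (s : List Int) :
    (PySem.List.pyRange 0 (PySem.List.len s - 1) 1).foldl
      (fun acc i =>
        if PySem.List.pyGetD s (i + 1) 0 - PySem.List.pyGetD s i 0 - 1 > 0 then
          acc ++ [[("start_rank", PySem.List.pyGetD s i 0 + 1),
                   ("end_rank", PySem.List.pyGetD s (i + 1) 0 - 1),
                   ("gap_size", PySem.List.pyGetD s (i + 1) 0 - PySem.List.pyGetD s i 0 - 1)]]
        else acc) []
      = pvGaps s := by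
  have hbody : (fun (acc : List (List (String × Int))) (i : Int) =>
        if PySem.List.pyGetD s (i + 1) 0 - PySem.List.pyGetD s i 0 - 1 > 0 then
          acc ++ [[("start_rank", PySem.List.pyGetD s i 0 + 1),
                   ("end_rank", PySem.List.pyGetD s (i + 1) 0 - 1),
                   ("gap_size", PySem.List.pyGetD s (i + 1) 0 - PySem.List.pyGetD s i 0 - 1)]]
        else acc)
      = (fun acc i =>
          (fun (acc : List (List (String × Int))) (p : Int × Int) =>
            if (fun (p : Int × Int) => decide (p.2 - p.1 > 1)) p = true then
              acc ++ [(fun (p : Int × Int) => pvGapRec p.1 p.2) p] else acc) acc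
          ((fun i => (PySem.List.pyGetD s i 0, PySem.List.pyGetD s (i + 1) 0)) i)) := by
    funext acc i
    refine if_congr ?_ rfl rfl
    simp only [decide_eq_true_eq]
    omega
  have h1 := List.foldl_map
    (f := fun i => (PySem.List.pyGetD s i 0, PySem.List.pyGetD s (i + 1) 0))
    (g := fun (acc : List (List (String × Int))) (p : Int × Int) =>
            if (fun (p : Int × Int) => decide (p.2 - p.1 > 1)) p = true then
              acc ++ [(fun (p : Int × Int) => pvGapRec p.1 p.2) p] else acc)
    (l := PySem.List.pyRange 0 (PySem.List.len s - 1) 1) (init := [])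
  rw [hbody, ← h1, pairs_eq, PySem.List.foldl_append_if, List.nil_append,
    filter_zip_eq_pvGaps]

lemma portA_eq_take (ranks : List Int) :
    find_ranking_gaps_py ranks
      = (pvGaps (PySem.List.sorted ranks (fun x => x) false)).take 10 := by
  simp only [find_ranking_gaps_py]
  rw [foldA]
  rw [show ((10 : Int)) = ((10 : Nat) : Int) from by norm_num, PySem.List.slice_to_natCast]

-- B-side: mapping the gap-record builder over the kept gap starts of a suffix v
-- of the strictly sorted distinct list u reproduces pvGaps v
lemma coreB (present : List Int) (hi : Int) (u : List Int)
    (hmem : ∀ x, x ∈ present ↔ x ∈ u)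
    (hub : ∀ x ∈ u, x ≤ hi) (hhi : hi ∈ u) :
    ∀ (v w : List Int), u = w ++ v → u.Pairwise (· < ·) →
    ((v.map (fun r => r + 1)).filter
        (fun s => !present.contains s && decide (s ≤ hi))).map
      (fun s =>
        [("start_rank", s),
         ("end_rank", (PySem.List.min? (present.filter (fun x => decide (s < x))) (fun x => x)).getD 0 - 1),
         ("gap_size", (PySem.List.min? (present.filter (fun x => decide (s < x))) (fun x => x)).getD 0 - 1 - s + 1)])
      = pvGaps v := by
  intro v
  induction v with
  | nil => intro w _ _; rfl
  | cons a tl ih =>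
    intro w hsplit hpw
    cases tl with
    | nil =>
      -- a is the last and greatest element of u, so a+1 > hi: filtered out
      have hwa : ∀ x ∈ w, x < a := by
        intro x hx
        have := (List.pairwise_append.1 (hsplit ▸ hpw)).2.2
        exact this x hx a (by simp)
      have hha : hi ≤ a := by
        rw [hsplit] at hhi
        rcases List.mem_append.1 hhi with h | h
        · exact le_of_lt (hwa _ h)
        · simp at h; omega
      have hf : ¬ (a + 1 ≤ hi) := by omega
      simp [hf, pvGaps]
    | cons b t =>
      have hpw' := hsplit ▸ hpw
      have hwlt : ∀ x ∈ w, ∀ y ∈ a :: b :: t, x < y :=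
        (List.pairwise_append.1 hpw').2.2
      have htl : (a :: b :: t).Pairwise (· < ·) := (List.pairwise_append.1 hpw').2.1
      have hab : a < b := (List.pairwise_cons.1 htl).1 b (by simp)
      have hbt : ∀ y ∈ t, b < y :=
        fun y hy => (List.pairwise_cons.1 (List.pairwise_cons.1 htl).2).1 y hy
      have hsplit' : u = (w ++ [a]) ++ b :: t := by simp [hsplit]
      have hrec := ih (w ++ [a]) hsplit' hpw
      rw [List.map_cons, List.filter_cons]
      by_cases hgap : b = a + 1
      · -- no gap: a+1 = b ∈ present, filtered out
        have hmm : a + 1 ∈ present := (hmem _).2 (by rw [hsplit, ← hgap]; simp)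
        have hc : present.contains (a + 1) = true := List.contains_iff_mem.2 hmm
        rw [hc]
        simp only [Bool.not_true, Bool.false_and, Bool.false_eq_true, if_false]
        rw [hrec,
          show pvGaps (a :: b :: t)
              = (if b - a > 1 then [pvGapRec a b] else []) ++ pvGaps (b :: t) from rfl,
          if_neg (by omega), List.nil_append]
      · -- gap: a+1 ∉ u, a+1 ≤ hi, and min of present above a+1 is b
        have hgap' : a + 1 < b := by omega
        have hnot : a + 1 ∉ u := by
          rw [hsplit]
          intro hx
          rcases List.mem_append.1 hx with h | h
          · exact absurd (hwlt _ h a (by simp)) (by omega)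
          · rcases List.mem_cons.1 h with h1 | h
            · omega
            · rcases List.mem_cons.1 h with h2 | h
              · omega
              · exact absurd (hbt _ h) (by omega)
        have hnp : present.contains (a + 1) = false := by
          rw [Bool.eq_false_iff]
          intro h
          exact hnot ((hmem _).1 (List.contains_iff_mem.1 h))
        have hle : a + 1 ≤ hi := by
          have := hub b (by rw [hsplit]; simp)
          omega
        have hbmem : b ∈ present.filter (fun x => decide (a + 1 < x)) := by
          rw [List.mem_filter]
          exact ⟨(hmem b).2 (by rw [hsplit]; simp), by simpa using hgap'⟩
        have hminb : (PySem.List.min? (present.filter (fun x => decide (a + 1 < x))) (fun x => x)) = some b := by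
          cases hm : PySem.List.min? (present.filter (fun x => decide (a + 1 < x))) (fun x => x) with
          | none =>
            rw [PySem.List.min?_eq_none_iff] at hm
            rw [hm] at hbmem; cases hbmem
          | some m =>
            have hm1 := PySem.List.min?_mem hm
            have hm2 := PySem.List.min?_isMin hm b hbmem
            rw [List.mem_filter] at hm1
            have hmu : m ∈ u := (hmem m).1 hm1.1
            have hma : a + 1 < m := by simpa using hm1.2
            have hbm : b ≤ m := by
              rw [hsplit] at hmu
              rcases List.mem_append.1 hmu with h | h
              · exact absurd (hwlt _ h a (by simp)) (by omega)
              · rcases List.mem_cons.1 h with h1 | h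
                · omega
                · rcases List.mem_cons.1 h with h2 | h
                  · omega
                  · exact le_of_lt (hbt _ h)
            have hm2' : m ≤ b := hm2
            rw [le_antisymm hm2' hbm]
        rw [hnp]
        simp only [Bool.not_false, Bool.true_and, decide_eq_true_eq]
        rw [if_pos hle, List.map_cons, hrec, hminb]
        rw [show pvGaps (a :: b :: t)
              = (if b - a > 1 then [pvGapRec a b] else []) ++ pvGaps (b :: t) from rfl,
          if_pos (by omega)]
        simp only [Option.getD_some]
        rw [show b - 1 - (a + 1) + 1 = b - a - 1 from by ring]
        simp [pvGapRec]

lemma portB_eq_take (ranks : List Int) (hne : ranks ≠ []) :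
    find_ranking_gaps_py_alt ranks
      = (pvGaps (pvDD (PySem.List.sorted ranks (fun x => x) false))).take 10 := by
  set present := PySem.Set.ofList ranks with hp
  set u := pvDD (PySem.List.sorted ranks (fun x => x) false) with hudef
  have hmem : ∀ x, x ∈ present ↔ x ∈ u := by
    intro x
    rw [hp, hudef, pvDD_mem, PySem.List.mem_sorted]
    exact PySem.Set.mem_ofList ranks x
  have hupw : u.Pairwise (· < ·) :=
    pvDD_pairwise_lt _ (PySem.List.sorted_pairwise ranks (fun x => x))
  have hperm : present.Perm u := by
    have h1 : (PySem.List.sorted (PySem.Set.ofList ranks) (fun x => x) false).Perm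
        (PySem.Set.ofList ranks) := PySem.List.sorted_perm _ _ _
    rw [sorted_set_eq_pvDD ranks] at h1
    exact h1.symm
  have hpne : present ≠ [] := by
    intro h
    rcases List.exists_mem_of_ne_nil ranks hne with ⟨x, hx⟩
    have hxp : x ∈ present := (PySem.Set.mem_ofList ranks x).2 hx
    rw [h] at hxp; cases hxp
  have hie : present.isEmpty = false := by
    cases hpl : present with
    | nil => exact absurd hpl hpne
    | cons c cs => simp
  obtain ⟨hi, hhi⟩ : ∃ m, PySem.List.max? present (fun x => x) = some m := by
    cases hm : PySem.List.max? present (fun x => x) with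
    | none => rw [PySem.List.max?_eq_none_iff] at hm; exact absurd hm hpne
    | some m => exact ⟨m, rfl⟩
  have hhiu : hi ∈ u := (hmem hi).1 (PySem.List.max?_mem hhi)
  have hub : ∀ x ∈ u, x ≤ hi := by
    intro x hx
    have := PySem.List.max?_isMax hhi x ((hmem x).2 hx)
    simpa using this
  have hPf : ((present.map (fun r => r + 1)).filter
        (fun s => !present.contains s && decide (s ≤ hi))).Perm
      ((u.map (fun r => r + 1)).filter
        (fun s => !present.contains s && decide (s ≤ hi))) :=
    (hperm.map _).filter _
  have hmpw : (u.map (fun r => r + 1)).Pairwise (· < ·) :=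
    (List.pairwise_map).2 (hupw.imp (fun h => by omega))
  have hflt : ((u.map (fun r => r + 1)).filter
        (fun s => !present.contains s && decide (s ≤ hi))).Pairwise (· < ·) :=
    List.Pairwise.sublist (List.filter_sublist) hmpw
  have hsortedf : PySem.List.sorted
      ((present.map (fun r => r + 1)).filter
        (fun s => !present.contains s && decide (s ≤ hi))) (fun x => x) false
      = (u.map (fun r => r + 1)).filter
        (fun s => !present.contains s && decide (s ≤ hi)) :=
    PySem.List.sorted_eq_of_perm_of_pairwise_lt _ _ _ hPf.symm hflt
  have hcore := coreB present hi u hmem hub hhiu u [] rfl hupw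
  simp only [find_ranking_gaps_py_alt]
  rw [← hp, hie]
  simp only [Bool.false_eq_true, if_false, hhi, Option.getD_some, hsortedf]
  rw [show ((10 : Int)) = ((10 : Nat) : Int) from by norm_num, PySem.List.slice_to_natCast,
    List.map_take]
  simp only [PySem.Set.contains_eq_listContains]
  rw [hcore]

-- ===== VERDICT (by name: the statement is the Claim_ definition above) =====
theorem find_ranking_gaps_py_spec : Claim_equal_find_ranking_gaps_py := by
  intro ranks _
  unfold Spec_find_ranking_gaps_py
  by_cases hne : ranks = []
  · subst hne; rfl
  · rw [portA_eq_take, portB_eq_take ranks hne, ← pvGaps_pvDD]
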